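-- pv_equiv track=rewrite | github.com/microsoft/dist-ir | examples/bert_tiny.py | subfinder_dp
-- ===== SOURCE A (Python) =====
-- def subfinder_dp(mylist, pattern):
--     """Finds the maximum number of non-overlapping appearances of a sublist."""
--     list_len = len(mylist)
--     pattern_len = len(pattern)
--     counts = [0] * list_len
--     for i in range(list_len - 1, -1, -1):
--         if mylist[i] == pattern[0] and mylist[i : i + pattern_len] == pattern:
--             counts[i] = max(
--                 1 + (0 if pattern_len + i >= list_len else counts[i + pattern_len]),
--                 0 if i == list_len - 1 else counts[i + 1],
--             )
--         elif i < list_len - 1: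
--             counts[i] = counts[i + 1]
--     return counts[0]
-- ===== SOURCE B (Python) =====
-- def subfinder_dp(mylist, pattern):
--     """Greedy left-to-right scan: count leftmost non-overlapping occurrences.
--
--     Single forward pass, no DP table: take each leftmost match and jump
--     past it; this is provably the maximum number of non-overlapping
--     occurrences (the value A's right-to-left DP computes).
--     """
--     m = len(pattern)
--     if m == 0:
--         return 0
--     n = len(mylist)
--     count = 0
--     i = 0
--     while i + m <= n:
--         if mylist[i:i + m] == pattern:
--             count += 1
--             i += m
--         else:
--             i += 1
--     return count
-- ===== Notes on version B (the rewrite author's own statement) =====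
-- stated objective: faster
-- what changed: Replaces the right-to-left DP over a counts array (a max at every match position) by a single greedy left-to-right scan that takes each leftmost match and jumps past it, with no auxiliary array; the greedy count provably equals the DP optimum.
import Mathlib
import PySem

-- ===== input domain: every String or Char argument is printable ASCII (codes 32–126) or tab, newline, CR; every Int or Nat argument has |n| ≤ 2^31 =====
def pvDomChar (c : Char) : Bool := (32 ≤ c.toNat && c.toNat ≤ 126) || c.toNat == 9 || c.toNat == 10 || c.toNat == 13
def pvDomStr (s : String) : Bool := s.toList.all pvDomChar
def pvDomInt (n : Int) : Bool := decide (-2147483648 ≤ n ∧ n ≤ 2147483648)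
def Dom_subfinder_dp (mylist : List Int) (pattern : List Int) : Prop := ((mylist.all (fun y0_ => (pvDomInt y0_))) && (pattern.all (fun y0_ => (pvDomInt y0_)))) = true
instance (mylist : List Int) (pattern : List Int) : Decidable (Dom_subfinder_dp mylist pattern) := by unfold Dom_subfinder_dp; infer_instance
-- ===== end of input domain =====

-- B replaces A's right-to-left DP over a counts array by a greedy left-to-right
-- scan (take each leftmost match, jump past it) with no auxiliary array;
-- return values proved equal whenever both lists are nonempty (A raises otherwise).


-- ===== PORT A =====
-- one iteration of A's loop body: counts[i] updated exactly as in the Python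
def subAStep (mylist pattern : List Int) (list_len pattern_len : Nat)
    (counts : List Int) (i : Int) : List Int :=
  if PySem.List.pyGetD mylist i 0 = PySem.List.pyGetD pattern 0 0 ∧
     PySem.List.slice mylist (some i) (some (i + (pattern_len : Int))) = pattern then
    PySem.List.pySetD counts i
      (max (1 + (if (pattern_len : Int) + i ≥ (list_len : Int) then 0
                 else PySem.List.pyGetD counts (i + (pattern_len : Int)) 0))
           (if i = (list_len : Int) - 1 then 0
            else PySem.List.pyGetD counts (i + 1) 0))
  else if i < (list_len : Int) - 1 then
    PySem.List.pySetD counts i (PySem.List.pyGetD counts (i + 1) 0)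
  else counts

def subfinder_dp (mylist : List Int) (pattern : List Int) : Int :=
  let list_len := mylist.length
  let pattern_len := pattern.length
  let counts : List Int := List.replicate list_len 0
  let counts := (PySem.List.pyRange ((list_len : Int) - 1) (-1) (-1)).foldl
      (subAStep mylist pattern list_len pattern_len) counts
  PySem.List.pyGetD counts 0 0

-- ===== PORT B =====
-- B's while loop: greedy scan from index i with accumulator count
-- (the '0 < pat.length' conjunct only makes the recursion total; B's Python
-- reaches the loop only after its 'if m == 0: return 0' early exit)
def subAltLoop (xs pat : List Int) (i : Nat) (count : Int) : Int :=
  if h : 0 < pat.length ∧ i + pat.length ≤ xs.length then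
    if (xs.drop i).take pat.length = pat then
      subAltLoop xs pat (i + pat.length) (count + 1)
    else
      subAltLoop xs pat (i + 1) count
  else count
termination_by xs.length - i
decreasing_by all_goals omega

def subfinder_dp_alt (mylist : List Int) (pattern : List Int) : Int :=
  if pattern.length = 0 then 0
  else subAltLoop mylist pattern 0 0

-- ===== PRECONDITION & SPEC =====
-- Pre_ excludes exactly the inputs where A raises IndexError: empty mylist
-- (counts[0] out of range) or empty pattern (pattern[0] out of range).
def Pre_subfinder_dp (mylist : List Int) (pattern : List Int) : Prop :=
  mylist ≠ [] ∧ pattern ≠ []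
instance (mylist : List Int) (pattern : List Int) : Decidable (Pre_subfinder_dp mylist pattern) := by unfold Pre_subfinder_dp; infer_instance

def pvWitness_subfinder_dp : List Int × List Int := ([1, 2, 1, 2, 1, 2], [1, 2])

def Spec_subfinder_dp (mylist : List Int) (pattern : List Int) (out : Int) : Prop := out = subfinder_dp_alt mylist pattern
instance (mylist : List Int) (pattern : List Int) (out : Int) : Decidable (Spec_subfinder_dp mylist pattern out) := by unfold Spec_subfinder_dp; infer_instance

-- ===== CLAIM (what is proved, stated in full; the proofs are below) =====
def Claim_equal_subfinder_dp : Prop := ∀ (mylist : List Int) (pattern : List Int), Dom_subfinder_dp mylist pattern → Pre_subfinder_dp mylist pattern → Spec_subfinder_dp mylist pattern (subfinder_dp mylist pattern)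

-- ===== LEMMAS AND PROOFS =====

-- the DP value A's counts array holds for the suffix starting at i
def Fdp (xs pat : List Int) (i : Nat) : Int :=
  if h1 : i < xs.length then
    if h2 : 0 < pat.length ∧ (xs.drop i).take pat.length = pat then
      max (1 + Fdp xs pat (i + pat.length)) (Fdp xs pat (i + 1))
    else Fdp xs pat (i + 1)
  else 0
termination_by xs.length - i
decreasing_by all_goals omega

theorem Fdp_of_le (xs pat : List Int) (i : Nat) (h : xs.length ≤ i) :
    Fdp xs pat i = 0 := by
  rw [Fdp]; simp [Nat.not_lt.mpr h]

theorem Fdp_nonneg (xs pat : List Int) (i : Nat) : 0 ≤ Fdp xs pat i := by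
  induction i using Fdp.induct xs pat with
  | case1 i h1 h2 ih1 ih2 => rw [Fdp]; simp [h1, h2]; left; linarith
  | case2 i h1 h2 ih => rw [Fdp]; simp [h1, h2]; exact ih
  | case3 i h1 => rw [Fdp]; simp [h1]

theorem Fdp_nomatch (xs pat : List Int) (i : Nat)
    (h : ¬ (0 < pat.length ∧ (xs.drop i).take pat.length = pat)) :
    Fdp xs pat i = Fdp xs pat (i + 1) := by
  by_cases h1 : i < xs.length
  · rw [Fdp]; simp [h1, h]
  · rw [Fdp_of_le xs pat i (by omega), Fdp_of_le xs pat (i+1) (by omega)]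

theorem Fdp_mono (xs pat : List Int) (i : Nat) :
    Fdp xs pat (i + 1) ≤ Fdp xs pat i := by
  by_cases h1 : i < xs.length
  · by_cases h2 : 0 < pat.length ∧ (xs.drop i).take pat.length = pat
    · conv_rhs => rw [Fdp]
      simp [h1, h2]
    · rw [Fdp_nomatch xs pat i h2]
  · rw [Fdp_of_le xs pat i (by omega), Fdp_of_le xs pat (i+1) (by omega)]

theorem Fdp_anti (xs pat : List Int) (i j : Nat) (h : i ≤ j) :
    Fdp xs pat j ≤ Fdp xs pat i := by
  induction j, h using Nat.le_induction with
  | base => exact le_refl _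
  | succ j hij ih => exact le_trans (Fdp_mono xs pat j) ih

-- the greedy-exchange inequality: skipping one position costs at most one match
theorem Fdp_key (xs pat : List Int) (i : Nat) :
    Fdp xs pat (i + 1) ≤ 1 + Fdp xs pat (i + pat.length) := by
  induction hd : xs.length - i using Nat.strong_induction_on generalizing i with
  | _ d ih =>
    by_cases hn : i + 1 < xs.length
    · have hrec : Fdp xs pat (i + 1 + 1) ≤ 1 + Fdp xs pat (i + 1 + pat.length) :=
        ih (xs.length - (i + 1)) (by omega) (i + 1) rfl
      have hanti : Fdp xs pat (i + 1 + pat.length) ≤ Fdp xs pat (i + pat.length) :=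
        Fdp_anti xs pat _ _ (by omega)
      by_cases h2 : 0 < pat.length ∧ (xs.drop (i+1)).take pat.length = pat
      · conv_lhs => rw [Fdp]
        rw [dif_pos hn, dif_pos h2, max_le_iff]
        exact ⟨by omega, by omega⟩
      · rw [Fdp_nomatch xs pat (i+1) h2]
        omega
    · rw [Fdp_of_le xs pat (i+1) (by omega)]
      have := Fdp_nonneg xs pat (i + pat.length)
      omega

theorem Fdp_no_room (xs pat : List Int) (i : Nat) (hm : 0 < pat.length)
    (h : xs.length < i + pat.length) :
    Fdp xs pat i = 0 := by
  induction hd : xs.length - i using Nat.strong_induction_on generalizing i with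
  | _ d ih =>
    by_cases h1 : i < xs.length
    · have hnm : ¬ (0 < pat.length ∧ (xs.drop i).take pat.length = pat) := by
        rintro ⟨-, he⟩
        have : ((xs.drop i).take pat.length).length = pat.length := by rw [he]
        simp [List.length_take, List.length_drop] at this
        omega
      rw [Fdp_nomatch xs pat i hnm]
      exact ih (xs.length - (i + 1)) (by omega) (i + 1) (by omega) rfl
    · exact Fdp_of_le xs pat i (by omega)

-- B's greedy loop computes the DP value
theorem subAltLoop_eq (xs pat : List Int) (hm : 0 < pat.length) :
    ∀ (i : Nat) (c : Int), subAltLoop xs pat i c = c + Fdp xs pat i := by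
  intro i
  induction hd : xs.length - i using Nat.strong_induction_on generalizing i with
  | _ d ih =>
    intro c
    by_cases h : i + pat.length ≤ xs.length
    · rw [subAltLoop, dif_pos ⟨hm, h⟩]
      by_cases hmt : (xs.drop i).take pat.length = pat
      · rw [if_pos hmt, ih (xs.length - (i + pat.length)) (by omega) (i + pat.length) rfl]
        have hF : Fdp xs pat i = 1 + Fdp xs pat (i + pat.length) := by
          rw [Fdp, dif_pos (by omega : i < xs.length), dif_pos ⟨hm, hmt⟩]
          have := Fdp_key xs pat i
          omega
        omega
      · rw [if_neg hmt, ih (xs.length - (i + 1)) (by omega) (i + 1) rfl,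
            ← Fdp_nomatch xs pat i (fun hc => hmt hc.2)]
    · rw [subAltLoop, dif_neg (fun hh => h hh.2),
          Fdp_no_room xs pat i hm (by omega)]
      ring

-- A's loop-body condition is exactly "pattern matches at k"
theorem match_iff (xs pat : List Int) (hm : 0 < pat.length) (k : Nat) :
    (PySem.List.pyGetD xs (k:Int) 0 = PySem.List.pyGetD pat 0 0 ∧
     PySem.List.slice xs (some (k:Int)) (some ((k:Int) + (pat.length : Int))) = pat) ↔
    (xs.drop k).take pat.length = pat := by
  rw [PySem.List.slice_natCast_add]
  constructor
  · exact And.right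
  · intro he
    refine ⟨?_, he⟩
    have h1 : ((xs.drop k).take pat.length)[0]? = pat[0]? := by rw [he]
    rw [List.getElem?_take, List.getElem?_drop] at h1
    simp only [hm, if_pos] at h1
    simp only [PySem.List.pyGetD_natCast, PySem.List.pyGetD_zero]
    simp only [List.getD_eq_getElem?_getD]
    rw [← h1]
    norm_num

-- one step of A's loop preserves the counts-array invariant
theorem step_inv (xs pat : List Int) (hm : 0 < pat.length) (k : Nat) (hk : k < xs.length)
    (arr : List Int) (hlen : arr.length = xs.length)
    (hinv : ∀ j : Nat, j < xs.length → arr.getD j 0 = if k + 1 ≤ j then Fdp xs pat j else 0) :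
    (subAStep xs pat xs.length pat.length arr (k:Int)).length = xs.length ∧
    ∀ j : Nat, j < xs.length →
      (subAStep xs pat xs.length pat.length arr (k:Int)).getD j 0
        = if k ≤ j then Fdp xs pat j else 0 := by
  unfold subAStep
  by_cases hmt : (xs.drop k).take pat.length = pat
  · rw [if_pos ((match_iff xs pat hm k).mpr hmt)]
    have hv1 : (if (pat.length : Int) + (k:Int) ≥ (xs.length : Int) then 0
        else PySem.List.pyGetD arr ((k:Int) + (pat.length : Int)) 0) = Fdp xs pat (k + pat.length) := by
      by_cases hc : xs.length ≤ k + pat.length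
      · rw [if_pos (by omega), Fdp_of_le xs pat _ hc]
      · rw [if_neg (by omega)]
        have : (k:Int) + (pat.length:Int) = ((k + pat.length : Nat) : Int) := by omega
        rw [this, PySem.List.pyGetD_natCast, hinv _ (by omega), if_pos (by omega)]
    have hv2 : (if (k:Int) = (xs.length : Int) - 1 then 0
        else PySem.List.pyGetD arr ((k:Int) + 1) 0) = Fdp xs pat (k + 1) := by
      by_cases hc : k = xs.length - 1
      · rw [if_pos (by omega), Fdp_of_le xs pat _ (by omega)]
      · rw [if_neg (by omega)]
        have : (k:Int) + 1 = ((k + 1 : Nat) : Int) := by omega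
        rw [this, PySem.List.pyGetD_natCast, hinv _ (by omega), if_pos (by omega)]
    rw [hv1, hv2, PySem.List.pySetD_natCast]
    have hFk : Fdp xs pat k = max (1 + Fdp xs pat (k + pat.length)) (Fdp xs pat (k + 1)) := by
      rw [Fdp, dif_pos hk, dif_pos ⟨hm, hmt⟩]
    refine ⟨by simp [hlen], fun j hj => ?_⟩
    rcases eq_or_ne j k with rfl | hne
    · rw [List.getD_eq_getElem?_getD, List.getElem?_set_self (by omega), if_pos (le_refl _)]
      simp [hFk]
    · rw [List.getD_eq_getElem?_getD, List.getElem?_set_ne (by omega),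
          ← List.getD_eq_getElem?_getD, hinv _ hj]
      by_cases hlt : j < k
      · rw [if_neg (by omega), if_neg (by omega)]
      · rw [if_pos (by omega), if_pos (by omega)]
  · rw [if_neg (fun hc => hmt ((match_iff xs pat hm k).mp hc))]
    have hFk : Fdp xs pat k = Fdp xs pat (k + 1) := Fdp_nomatch xs pat k (fun hc => hmt hc.2)
    by_cases hc : k < xs.length - 1
    · rw [if_pos (by omega)]
      have : (k:Int) + 1 = ((k + 1 : Nat) : Int) := by omega
      rw [this, PySem.List.pyGetD_natCast, PySem.List.pySetD_natCast, hinv _ (by omega),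
          if_pos (by omega)]
      refine ⟨by simp [hlen], fun j hj => ?_⟩
      rcases eq_or_ne j k with rfl | hne
      · rw [List.getD_eq_getElem?_getD, List.getElem?_set_self (by omega), if_pos (le_refl _)]
        simp [hFk]
      · rw [List.getD_eq_getElem?_getD, List.getElem?_set_ne (by omega),
            ← List.getD_eq_getElem?_getD, hinv _ hj]
        by_cases hlt : j < k
        · rw [if_neg (by omega), if_neg (by omega)]
        · rw [if_pos (by omega), if_pos (by omega)]
    · rw [if_neg (by omega)]
      refine ⟨hlen, fun j hj => ?_⟩
      rw [hinv _ hj]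
      rcases eq_or_ne j k with rfl | hne
      · rw [if_neg (by omega), if_pos (le_refl _), hFk, Fdp_of_le xs pat _ (by omega)]
      · by_cases hlt : j < k
        · rw [if_neg (by omega), if_neg (by omega)]
        · rw [if_pos (by omega), if_pos (by omega)]

-- A's whole countdown loop fills counts[j] with Fdp j
theorem fold_inv (xs pat : List Int) (hm : 0 < pat.length) :
    ∀ (k : Nat) (arr : List Int), k ≤ xs.length → arr.length = xs.length →
      (∀ j : Nat, j < xs.length → arr.getD j 0 = if k ≤ j then Fdp xs pat j else 0) →
      ∀ j : Nat, j < xs.length →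
        ((PySem.List.pyRange ((k : Int) - 1) (-1) (-1)).foldl
          (subAStep xs pat xs.length pat.length) arr).getD j 0 = Fdp xs pat j := by
  intro k
  induction k with
  | zero =>
    intro arr _ _ hinv j hj
    rw [show ((0:Nat):Int) - 1 = (-1 : Int) by norm_num,
        PySem.List.pyRange_neg_one_eq_nil (le_refl _)]
    simpa using hinv j hj
  | succ k ih =>
    intro arr hk hlen hinv j hj
    rw [show ((k+1:Nat):Int) - 1 = ((k:Nat):Int) by omega,
        PySem.List.pyRange_neg_one_cons (by omega : (-1:Int) < (k:Nat)), List.foldl_cons]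
    obtain ⟨hl', hi'⟩ := step_inv xs pat hm k (by omega) arr hlen hinv
    exact ih _ (by omega) hl' hi' j hj

theorem final_eq (xs pat : List Int) (hx : xs ≠ []) (hp : pat ≠ []) :
    subfinder_dp xs pat = subfinder_dp_alt xs pat := by
  have hm : 0 < pat.length := List.length_pos_iff.mpr hp
  have hn : 0 < xs.length := List.length_pos_iff.mpr hx
  unfold subfinder_dp
  rw [PySem.List.pyGetD_zero]
  rw [fold_inv xs pat hm xs.length (List.replicate xs.length 0) (le_refl _)
      (by simp) (fun j hj => by simp [List.getD_eq_getElem?_getD, hj])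
      0 hn]
  unfold subfinder_dp_alt
  rw [if_neg (by omega), subAltLoop_eq xs pat hm 0 0]
  ring

-- ===== VERDICT (by name: the statement is the Claim_ definition above) =====
theorem subfinder_dp_spec : Claim_equal_subfinder_dp := by
  intro xs pat _ hpre
  exact final_eq xs pat hpre.1 hpre.2
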